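-- pv_equiv track=rewrite | github.com/Muzaraigne/adventurecode | 2015/jour20/sol.py | solve_elf_problem
-- ===== SOURCE A (Python) =====
-- def solve_elf_problem(objectif, cadeaux_par_elfe, maisons_visitees=None):
--     max_maison = objectif // cadeaux_par_elfe
--     houses = [0] * (max_maison * 2)
--
--
--     for elfe in range(1, len(houses)):
--         if maisons_visitees is not None:
--
--             for i in range(1, maisons_visitees + 1):
--                 maison = elfe * i
--                 if maison >= len(houses):
--                     break
--                 houses[maison] += elfe * cadeaux_par_elfe
--         else:
--
--             for maison in range(elfe, len(houses), elfe):
--                 houses[maison] += elfe * cadeaux_par_elfe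
--
--
--     for k in range(1, len(houses)):
--         if houses[k] >= objectif:
--             return k
--
--     return -1
-- ===== SOURCE B (Python) =====
-- def solve_elf_problem(objectif, cadeaux_par_elfe, maisons_visitees=None):
--     length = (objectif // cadeaux_par_elfe) * 2
--     for k in range(1, length):
--         total = 0
--         d = 1
--         while d * d <= k:
--             if k % d == 0:
--                 e = k // d
--                 if maisons_visitees is None or e <= maisons_visitees:
--                     total += d * cadeaux_par_elfe
--                 if e != d and (maisons_visitees is None or d <= maisons_visitees):
--                     total += e * cadeaux_par_elfe
--             d += 1
--         if total >= objectif: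
--             return k
--     return -1
-- ===== Notes on version B (the rewrite author's own statement) =====
-- stated objective: alternative
-- what changed: A fills a shared houses array elf-by-elf (a sieve over all multiples of every elf) and then scans it; B keeps no array and instead computes each house's gift total directly by trial division up to sqrt(k), pairing each divisor d with k//d (limited mode keeps a divisor d only when k//d <= maisons_visitees), returning at the first house reaching objectif.
import Mathlib
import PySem

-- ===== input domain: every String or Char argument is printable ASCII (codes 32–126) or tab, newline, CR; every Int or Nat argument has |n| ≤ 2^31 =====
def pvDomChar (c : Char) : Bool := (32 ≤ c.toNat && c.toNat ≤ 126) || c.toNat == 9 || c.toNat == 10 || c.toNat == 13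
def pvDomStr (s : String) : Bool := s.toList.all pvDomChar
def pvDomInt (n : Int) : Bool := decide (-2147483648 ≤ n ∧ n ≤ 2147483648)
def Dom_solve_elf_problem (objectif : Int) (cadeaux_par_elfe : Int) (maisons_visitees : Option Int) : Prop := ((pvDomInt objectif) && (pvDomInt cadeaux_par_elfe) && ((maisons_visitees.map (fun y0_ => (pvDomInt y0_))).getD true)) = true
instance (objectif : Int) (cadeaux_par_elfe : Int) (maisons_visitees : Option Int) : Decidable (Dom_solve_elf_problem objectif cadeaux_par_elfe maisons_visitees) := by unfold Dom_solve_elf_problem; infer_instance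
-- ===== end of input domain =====

-- B replaces A's elf-major sieve over an array by a per-house divisor sum (trial division
-- up to √k, pairing each divisor d with k/d), returning at the first qualifying house;
-- objective: alternative algorithm, no array state.

-- ===== PORT A =====

-- Python's houses list is used with O(1) item read/assignment, so it is ported as an
-- Array Int; every index written/read below (elfe*i, maison, k) is ≥ 0 and the writes are
-- guarded in range, so '.toNat' indexing is exact here. len(houses) is constant = L,
-- since item assignment never changes the length.
-- inner limited loop: 'for i in range(1, maisons_visitees+1): maison = elfe*i;
-- if maison >= len(houses): break; houses[maison] += elfe*cadeaux'
def innerLimA (cadeaux L elfe : Int) (hs : Array Int) : List Int → Array Int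
  | [] => hs
  | i :: rest =>
      if elfe * i ≥ L then hs
      else innerLimA cadeaux L elfe
        (hs.setIfInBounds (elfe * i).toNat
          (hs.getD (elfe * i).toNat 0 + elfe * cadeaux)) rest

-- one iteration of the outer 'for elfe in range(1, len(houses))' loop
def elfStep (cadeaux : Int) (maisons_visitees : Option Int) (hs : Array Int) (elfe : Int) : Array Int :=
  match maisons_visitees with
  | some m => innerLimA cadeaux (hs.size : Int) elfe hs (PySem.List.pyRange 1 (m + 1) 1)
  | none =>
      (PySem.List.pyRange elfe (hs.size : Int) elfe).foldl
        (fun h maison =>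
          h.setIfInBounds maison.toNat (h.getD maison.toNat 0 + elfe * cadeaux)) hs

-- final scan 'for k in range(1, len(houses)): if houses[k] >= objectif: return k / return -1'
def findA (houses : Array Int) (objectif : Int) : List Int → Int
  | [] => -1
  | k :: rest =>
      if houses.getD k.toNat 0 ≥ objectif then k else findA houses objectif rest

def solve_elf_problem (objectif : Int) (cadeaux_par_elfe : Int) (maisons_visitees : Option Int) : Int :=
  let max_maison := PySem.Int.floordiv objectif cadeaux_par_elfe
  let houses0 : Array Int := Array.replicate (max_maison * 2).toNat 0
  let houses := (PySem.List.pyRange 1 (houses0.size : Int) 1).foldl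
      (elfStep cadeaux_par_elfe maisons_visitees) houses0
  findA houses objectif (PySem.List.pyRange 1 (houses.size : Int) 1)

-- ===== PORT B =====

-- 'maisons_visitees is None or i <= maisons_visitees'
def okB (maisons_visitees : Option Int) (i : Int) : Bool :=
  match maisons_visitees with
  | none => true
  | some m => i ≤ m

-- the 'while d*d <= k' trial-division loop of B accumulating 'total'
def giftsGoB (k cadeaux : Int) (maisons_visitees : Option Int) (d : Nat) (total : Int) : Int :=
  if h : (d : Int) * (d : Int) ≤ k then
    let total1 :=
      if PySem.Int.mod k (d : Int) = 0 then
        let e := PySem.Int.floordiv k (d : Int)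
        let total2 := if okB maisons_visitees e then total + (d : Int) * cadeaux else total
        if e ≠ (d : Int) ∧ okB maisons_visitees (d : Int) then total2 + e * cadeaux else total2
      else total
    giftsGoB k cadeaux maisons_visitees (d + 1) total1
  else total
termination_by k.toNat + 1 - d
decreasing_by
  rcases Nat.eq_zero_or_pos d with h0 | h1
  · omega
  · have h1' : (1 : Int) ≤ (d : Int) := by exact_mod_cast h1
    have hd : (d : Int) ≤ (d : Int) * (d : Int) := le_mul_of_one_le_right (by linarith) h1'
    have : (d : Int) ≤ k := le_trans hd h
    omega

-- 'for k in range(1, length): …compute total…; if total >= objectif: return k / return -1'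
def findB (objectif cadeaux : Int) (maisons_visitees : Option Int) : List Int → Int
  | [] => -1
  | k :: rest =>
      if giftsGoB k cadeaux maisons_visitees 1 0 ≥ objectif then k
      else findB objectif cadeaux maisons_visitees rest

def solve_elf_problem_alt (objectif : Int) (cadeaux_par_elfe : Int) (maisons_visitees : Option Int) : Int :=
  let length := PySem.Int.floordiv objectif cadeaux_par_elfe * 2
  findB objectif cadeaux_par_elfe maisons_visitees (PySem.List.pyRange 1 length 1)

-- ===== PRECONDITION & SPEC =====
-- Pre_ excludes cadeaux_par_elfe = 0, on which Python A raises ZeroDivisionError (B raises too).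
def Pre_solve_elf_problem (objectif : Int) (cadeaux_par_elfe : Int) (maisons_visitees : Option Int) : Prop :=
  cadeaux_par_elfe ≠ 0
instance (objectif : Int) (cadeaux_par_elfe : Int) (maisons_visitees : Option Int) : Decidable (Pre_solve_elf_problem objectif cadeaux_par_elfe maisons_visitees) := by unfold Pre_solve_elf_problem; infer_instance

def pvWitness_solve_elf_problem : Int × Int × Option Int := (10, 2, none)

def Spec_solve_elf_problem (objectif : Int) (cadeaux_par_elfe : Int) (maisons_visitees : Option Int) (out : Int) : Prop := out = solve_elf_problem_alt objectif cadeaux_par_elfe maisons_visitees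
instance (objectif : Int) (cadeaux_par_elfe : Int) (maisons_visitees : Option Int) (out : Int) : Decidable (Spec_solve_elf_problem objectif cadeaux_par_elfe maisons_visitees out) := by unfold Spec_solve_elf_problem; infer_instance

-- ===== CLAIM (what is proved, stated in full; the proofs are below) =====
def Claim_equal_solve_elf_problem : Prop := ∀ (objectif : Int) (cadeaux_par_elfe : Int) (maisons_visitees : Option Int), Dom_solve_elf_problem objectif cadeaux_par_elfe maisons_visitees → Pre_solve_elf_problem objectif cadeaux_par_elfe maisons_visitees → Spec_solve_elf_problem objectif cadeaux_par_elfe maisons_visitees (solve_elf_problem objectif cadeaux_par_elfe maisons_visitees)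

-- ===== LEMMAS AND PROOFS =====

-- contribution of elf d to house n (the common spec of both programs)
def contrib (cadeaux : Int) (m? : Option Int) (n d : Nat) : Int :=
  if d ∣ n ∧ okB m? ((n / d : Nat) : Int) then (d : Int) * cadeaux else 0

-- one step of B's trial-division loop, as a function of the candidate divisor j
def stepB (cadeaux : Int) (m? : Option Int) (n j : Nat) : Int :=
  if j ∣ n then
    (if okB m? ((n / j : Nat) : Int) then (j : Int) * cadeaux else 0) +
    (if n / j ≠ j ∧ okB m? (j : Int) then ((n / j : Nat) : Int) * cadeaux else 0)
  else 0

lemma arr_get_set (a : Array Int) (i k : Nat) (v d : Int) (hi : i < a.size) :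
    (a.setIfInBounds i v).getD k d = if k = i then v else a.getD k d := by
  rw [Array.getD_eq_getD_getElem?, Array.getD_eq_getD_getElem?, Array.getElem?_setIfInBounds]
  by_cases hk : k = i
  · subst hk
    rw [if_pos rfl, if_pos rfl, if_pos hi]
    rfl
  · rw [if_neg (fun h => hk h.symm), if_neg hk]

lemma foldl_upd_size (v : Int) (elfe : Int) (is : List Int) : ∀ (hs : Array Int),
    (is.foldl (fun h j => h.setIfInBounds j.toNat (h.getD j.toNat 0 + elfe * v)) hs).size
      = hs.size := by
  induction is with
  | nil => intro hs; rfl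
  | cons j rest ih =>
      intro hs
      simp only [List.foldl_cons]
      rw [ih, Array.size_setIfInBounds]

lemma foldl_upd_get (v : Int) (elfe : Int) (is : List Int) : ∀ (hs : Array Int) (k : Nat),
    is.Nodup → (∀ j ∈ is, 0 ≤ j ∧ j < (hs.size : Int)) → k < hs.size →
    (is.foldl (fun h j => h.setIfInBounds j.toNat (h.getD j.toNat 0 + elfe * v)) hs).getD k 0
      = hs.getD k 0 + (if (k : Int) ∈ is then elfe * v else 0) := by
  induction is with
  | nil => intro hs k _ _ _; simp
  | cons j rest ih =>
      intro hs k hnd hin hk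
      simp only [List.foldl_cons]
      have hj := hin j (by simp)
      have hsz : (hs.setIfInBounds j.toNat (hs.getD j.toNat 0 + elfe * v)).size = hs.size :=
        Array.size_setIfInBounds
      rw [ih _ k (by exact hnd.of_cons)
          (by intro x hx; rw [hsz]; exact hin x (List.mem_cons_of_mem _ hx))
          (by rw [hsz]; exact hk)]
      rw [arr_get_set hs j.toNat k _ 0 (by omega)]
      by_cases hkj : (k : Int) = j
      · have hkj' : k = j.toNat := by omega
        have hknotin : (k : Int) ∉ rest := by
          rw [hkj]
          have := hnd
          simp [List.nodup_cons] at this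
          exact this.1
        rw [if_pos hkj', if_neg hknotin, if_pos (by rw [hkj]; exact List.mem_cons_self)]
        rw [hkj']
        ring
      · have hkj' : ¬ (k = j.toNat) := by omega
        rw [if_neg hkj']
        congr 1
        by_cases hmem : (k : Int) ∈ rest
        · rw [if_pos hmem, if_pos (List.mem_cons_of_mem _ hmem)]
        · rw [if_neg hmem, if_neg (by simp [List.mem_cons, hkj, hmem])]

lemma nodup_pyRange_pos (a b s : Int) (hs : 0 < s) : (PySem.List.pyRange a b s).Nodup := by
  rw [PySem.List.pyRange_of_pos _ _ hs]
  refine List.Nodup.map ?_ List.nodup_range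
  intro x y hxy
  have : s * (x : Int) = s * (y : Int) := by linarith
  have := mul_left_cancel₀ (ne_of_gt hs) this
  exact_mod_cast this

lemma innerLim_size (c L e : Int) (is : List Int) : ∀ (hs : Array Int),
    (innerLimA c L e hs is).size = hs.size := by
  induction is with
  | nil => intro hs; rfl
  | cons i rest ih =>
      intro hs
      unfold innerLimA
      split
      · rfl
      · rw [ih, Array.size_setIfInBounds]

lemma innerLim_get (c e m : Int) (he : 1 ≤ e) (n Len : Nat) (hnL : n < Len) :
    ∀ (fuel : Nat) (i0 : Int) (hs : Array Int), (m + 1 - i0).toNat ≤ fuel → 1 ≤ i0 →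
    hs.size = Len →
    (innerLimA c (Len : Int) e hs (PySem.List.pyRange i0 (m + 1) 1)).getD n 0
      = hs.getD n 0 +
        (if e ∣ (n : Int) ∧ i0 ≤ (n : Int) / e ∧ (n : Int) / e ≤ m then e * c else 0) := by
  intro fuel
  induction fuel with
  | zero =>
      intro i0 hs hfuel hi0 hlen
      have hmi : m + 1 ≤ i0 := by omega
      rw [PySem.List.pyRange_one_eq_nil hmi]
      unfold innerLimA
      rw [if_neg (by rintro ⟨_, h1, h2⟩; omega)]
      ring
  | succ fuel ih =>
      intro i0 hs hfuel hi0 hlen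
      by_cases hm : m + 1 ≤ i0
      · rw [PySem.List.pyRange_one_eq_nil hm]
        unfold innerLimA
        rw [if_neg (by rintro ⟨_, h1, h2⟩; omega)]
        ring
      · rw [not_le] at hm
        rw [PySem.List.pyRange_one_cons hm]
        unfold innerLimA
        by_cases hbrk : e * i0 ≥ (Len : Int)
        · rw [if_pos hbrk, if_neg]
          · ring
          · rintro ⟨hdvd, h1, h2⟩
            set q := (n : Int) / e with hq
            have hqe : e * q = (n : Int) := Int.mul_ediv_cancel' hdvd
            have : e * i0 ≤ e * q := mul_le_mul_of_nonneg_left h1 (by linarith)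
            omega
        · rw [not_le] at hbrk
          rw [if_neg (by omega)]
          have hpos : 0 ≤ e * i0 := by positivity
          set hs' := hs.setIfInBounds (e * i0).toNat
              (hs.getD (e * i0).toNat 0 + e * c) with hhs'
          have hlen' : hs'.size = Len := by
            rw [hhs', Array.size_setIfInBounds, hlen]
          rw [ih (i0 + 1) hs' (by omega) (by omega) hlen']
          have hget : hs'.getD n 0
              = if (n : Int) = e * i0 then hs.getD (e * i0).toNat 0 + e * c
                else hs.getD n 0 := by
            rw [hhs', arr_get_set hs (e * i0).toNat n _ 0 (by omega)]
            by_cases hne : (n : Int) = e * i0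
            · rw [if_pos (by omega), if_pos hne]
            · rw [if_neg (by omega), if_neg hne]
          rw [hget]
          by_cases hne : (n : Int) = e * i0
          · have hdvd : e ∣ (n : Int) := ⟨i0, hne⟩
            have hqq : (n : Int) / e = i0 := by
              rw [hne]; exact Int.mul_ediv_cancel_left _ (by omega)
            rw [if_pos hne, if_neg (by rintro ⟨_, h1, _⟩; omega),
                if_pos ⟨hdvd, by omega, by omega⟩]
            have hni : ((e * i0).toNat : Nat) = n := by omega
            rw [hni]; ring
          · rw [if_neg hne]
            congr 1
            by_cases hdvd : e ∣ (n : Int)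
            · have hqe : e * ((n : Int) / e) = (n : Int) := Int.mul_ediv_cancel' hdvd
              have hqne : (n : Int) / e ≠ i0 := by
                intro h; rw [h] at hqe; exact hne hqe.symm
              by_cases h1 : i0 + 1 ≤ (n : Int) / e ∧ (n : Int) / e ≤ m
              · rw [if_pos ⟨hdvd, h1.1, h1.2⟩, if_pos ⟨hdvd, by omega, h1.2⟩]
              · rw [if_neg (by rintro ⟨_, ha, hb⟩; exact h1 ⟨ha, hb⟩),
                    if_neg (by rintro ⟨_, ha, hb⟩; exact h1 ⟨by omega, hb⟩)]
            · rw [if_neg (by rintro ⟨h, _⟩; exact hdvd h),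
                  if_neg (by rintro ⟨h, _⟩; exact hdvd h)]

lemma elfStep_size (c : Int) (m? : Option Int) (hs : Array Int) (e : Int) :
    (elfStep c m? hs e).size = hs.size := by
  unfold elfStep
  match m? with
  | some m => exact innerLim_size _ _ _ _ _
  | none => exact foldl_upd_size _ _ _ _

lemma elfStep_get (c : Int) (m? : Option Int) (d n : Nat) (hd : 1 ≤ d) (hn : 1 ≤ n)
    (hs : Array Int) (hnlen : n < hs.size) :
    (elfStep c m? hs (d : Int)).getD n 0 = hs.getD n 0 + contrib c m? n d := by
  have hd' : (1 : Int) ≤ (d : Int) := by exact_mod_cast hd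
  have hn' : (1 : Int) ≤ (n : Int) := by exact_mod_cast hn
  have hnlen' : (n : Int) < (hs.size : Int) := by exact_mod_cast hnlen
  have hdiv : ((n / d : Nat) : Int) = (n : Int) / (d : Int) := Int.natCast_div n d
  match m? with
  | some m =>
      unfold elfStep
      rw [innerLim_get c (d : Int) m hd' n hs.size hnlen (m + 1 - 1).toNat 1 hs
          (by omega) (by omega) rfl]
      unfold contrib
      congr 1
      by_cases hdvd : d ∣ n
      · have hdvd' : (d : Int) ∣ (n : Int) := by exact_mod_cast hdvd
        have hq1 : 1 ≤ (n : Int) / (d : Int) := by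
          have : 1 ≤ n / d := Nat.div_pos (Nat.le_of_dvd (by omega) hdvd) (by omega)
          omega
        by_cases hqm : ((n / d : Nat) : Int) ≤ m
        · rw [if_pos ⟨hdvd', by omega, by omega⟩, if_pos ⟨hdvd, by simpa [okB] using hqm⟩]
        · rw [if_neg (by rintro ⟨_, _, h2⟩; omega), if_neg]
          rintro ⟨_, h2⟩
          simp [okB] at h2
          omega
      · rw [if_neg (by rintro ⟨h, _⟩; exact hdvd (by exact_mod_cast h)),
            if_neg (by rintro ⟨h, _⟩; exact hdvd h)]
  | none =>
      unfold elfStep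
      rw [foldl_upd_get c (d : Int) _ hs n
          (nodup_pyRange_pos _ _ _ (by omega))
          (by
            intro j hj
            rw [PySem.List.mem_pyRange_iff_of_pos (by omega)] at hj
            exact ⟨by omega, hj.2.1⟩)
          hnlen]
      unfold contrib
      congr 1
      by_cases hdvd : d ∣ n
      · have hdvd' : (d : Int) ∣ (n : Int) := by exact_mod_cast hdvd
        have hdn : d ≤ n := Nat.le_of_dvd (by omega) hdvd
        have hmem : (n : Int) ∈ PySem.List.pyRange (d : Int) (hs.size : Int) (d : Int) := by
          rw [PySem.List.mem_pyRange_iff_of_pos (by omega)]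
          exact ⟨by exact_mod_cast hdn, hnlen', dvd_sub hdvd' (dvd_refl _)⟩
        rw [if_pos hmem, if_pos ⟨hdvd, by simp [okB]⟩]
      · have hmem : (n : Int) ∉ PySem.List.pyRange (d : Int) (hs.size : Int) (d : Int) := by
          rw [PySem.List.mem_pyRange_iff_of_pos (by omega)]
          rintro ⟨h1, h2, h3⟩
          have : (d : Int) ∣ (n : Int) := by
            have := dvd_add h3 (dvd_refl (d : Int))
            simpa using this
          exact hdvd (by exact_mod_cast this)
        rw [if_neg hmem, if_neg (by rintro ⟨h, _⟩; exact hdvd h)]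

lemma sieve_size (c : Int) (m? : Option Int) (is : List Int) : ∀ (hs : Array Int),
    (is.foldl (elfStep c m?) hs).size = hs.size := by
  induction is with
  | nil => intro hs; rfl
  | cons e rest ih =>
      intro hs
      simp only [List.foldl_cons]
      rw [ih, elfStep_size]

lemma sieve_get (c : Int) (m? : Option Int) (n : Nat) (hn : 1 ≤ n) :
    ∀ (B : Nat) (hs : Array Int), n < hs.size →
    ((PySem.List.pyRange 1 (B : Int) 1).foldl (elfStep c m?) hs).getD n 0
      = hs.getD n 0 + ∑ d ∈ Finset.Ico 1 B, contrib c m? n d := by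
  intro B
  induction B with
  | zero =>
      intro hs _
      rw [PySem.List.pyRange_one_eq_nil (by norm_num)]
      simp
  | succ B ih =>
      intro hs hnlen
      rcases Nat.eq_zero_or_pos B with hB0 | hB1
      · subst hB0
        rw [PySem.List.pyRange_one_eq_nil (by norm_num)]
        simp
      · have hcast : ((B + 1 : Nat) : Int) = (B : Int) + 1 := by push_cast; ring
        rw [hcast, PySem.List.pyRange_one_succ_right (by exact_mod_cast hB1),
            List.foldl_append]
        simp only [List.foldl_cons, List.foldl_nil]
        have hlen2 : n < ((PySem.List.pyRange 1 (B : Int) 1).foldl (elfStep c m?) hs).size := by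
          rw [sieve_size]; exact hnlen
        rw [elfStep_get c m? B n hB1 hn _ hlen2, ih hs hnlen,
            Finset.sum_Ico_succ_top hB1]
        ring

lemma sum_Ico_contrib (c : Int) (m? : Option Int) (n T : Nat) (hn : 1 ≤ n) (hnT : n < T) :
    ∑ d ∈ Finset.Ico 1 T, contrib c m? n d = ∑ d ∈ n.divisors, contrib c m? n d := by
  refine (Finset.sum_subset ?_ ?_).symm
  · intro d hd
    rw [Nat.mem_divisors] at hd
    have h1 : 1 ≤ d := Nat.pos_of_dvd_of_pos hd.1 (by omega)
    have h2 : d ≤ n := Nat.le_of_dvd (by omega) hd.1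
    rw [Finset.mem_Ico]
    omega
  · intro d _ hd
    rw [Nat.mem_divisors] at hd
    unfold contrib
    rw [if_neg]
    rintro ⟨h, _⟩
    exact hd ⟨h, by omega⟩

lemma replicate_get (T : Nat) (n : Nat) :
    (Array.replicate T (0 : Int)).getD n 0 = 0 := by
  rw [Array.getD_eq_getD_getElem?, Array.getElem?_replicate]
  split <;> rfl

lemma go_spec (n : Nat) (c : Int) (m? : Option Int) :
    ∀ (fuel : Nat) (d : Nat), 1 ≤ d → n.sqrt + 1 - d ≤ fuel → ∀ (t : Int),
    giftsGoB (n : Int) c m? d t = t + ∑ j ∈ Finset.Ico d (n.sqrt + 1), stepB c m? n j := by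
  intro fuel
  induction fuel with
  | zero =>
      intro d hd hfuel t
      have hds : n.sqrt < d := by omega
      have hno : ¬ ((d : Int) * (d : Int) ≤ (n : Int)) := by
        have : n < d * d := Nat.sqrt_lt.mp hds
        exact_mod_cast not_le.mpr (by exact_mod_cast this)
      rw [giftsGoB, dif_neg hno, Finset.Ico_eq_empty (by omega)]
      simp
  | succ fuel ih =>
      intro d hd hfuel t
      by_cases hcond : (d : Int) * (d : Int) ≤ (n : Int)
      · have hddn : d * d ≤ n := by exact_mod_cast hcond
        have hds : d ≤ n.sqrt := Nat.le_sqrt.mpr hddn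
        rw [giftsGoB, dif_pos hcond]
        rw [ih (d + 1) (by omega) (by omega)]
        rw [Finset.sum_eq_sum_Ico_succ_bot (by omega : d < n.sqrt + 1)]
        have hmod : PySem.Int.mod (n : Int) (d : Int) = ((n % d : Nat) : Int) :=
          PySem.Int.mod_natCast n d
        have hfd : PySem.Int.floordiv (n : Int) (d : Int) = ((n / d : Nat) : Int) :=
          PySem.Int.floordiv_natCast n d
        unfold stepB
        by_cases hdvd : d ∣ n
        · have hm0 : n % d = 0 := Nat.dvd_iff_mod_eq_zero.mp hdvd
          rw [hmod, hfd]
          rw [if_pos (show ((n % d : Nat) : Int) = 0 by simp [hm0])]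
          rw [if_pos hdvd]
          simp only [ne_eq, Nat.cast_inj]
          split_ifs <;> ring
        · have hm0 : n % d ≠ 0 := fun h => hdvd (Nat.dvd_of_mod_eq_zero h)
          rw [hmod]
          rw [if_neg (by exact_mod_cast hm0), if_neg hdvd]
          ring
      · have hds : n.sqrt < d := by
          have h1 : ¬ (d * d ≤ n) := fun h => hcond (by exact_mod_cast h)
          exact Nat.sqrt_lt.mpr (not_le.mp h1)
        rw [giftsGoB, dif_neg hcond, Finset.Ico_eq_empty (by omega)]
        simp

lemma pairing (c : Int) (m? : Option Int) (n : Nat) (hn : 1 ≤ n) :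
    ∑ j ∈ Finset.Ico 1 (n.sqrt + 1), stepB c m? n j = ∑ d ∈ n.divisors, contrib c m? n d := by
  have hn0 : n ≠ 0 := by omega
  -- restrict the left sum to the small divisors of n
  have hset : Finset.filter (fun j => j ∣ n) (Finset.Ico 1 (n.sqrt + 1))
      = Finset.filter (fun j => j * j ≤ n) n.divisors := by
    ext j
    simp only [Finset.mem_filter, Finset.mem_Ico, Nat.mem_divisors]
    constructor
    · rintro ⟨⟨h1, h2⟩, h3⟩
      exact ⟨⟨h3, hn0⟩, Nat.le_sqrt.mp (by omega)⟩
    · rintro ⟨⟨h1, _⟩, h2⟩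
      have hj1 : 1 ≤ j := Nat.pos_of_dvd_of_pos h1 (by omega)
      have := Nat.le_sqrt.mpr h2
      exact ⟨⟨hj1, by omega⟩, h1⟩
  have h1 : ∑ j ∈ Finset.Ico 1 (n.sqrt + 1), stepB c m? n j
      = ∑ j ∈ Finset.filter (fun j => j * j ≤ n) n.divisors, stepB c m? n j := by
    rw [← hset]
    refine (Finset.sum_filter_of_ne ?_).symm
    intro j _ hne
    by_contra hdvd
    exact hne (by unfold stepB; rw [if_neg hdvd])
  rw [h1]
  have h2 : ∀ j ∈ Finset.filter (fun j => j * j ≤ n) n.divisors,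
      stepB c m? n j = contrib c m? n j +
        (if n / j ≠ j then contrib c m? n (n / j) else 0) := by
    intro j hj
    rw [Finset.mem_filter, Nat.mem_divisors] at hj
    obtain ⟨⟨hdvd, _⟩, _⟩ := hj
    have hjdvd : n / j ∣ n := Nat.div_dvd_of_dvd hdvd
    have hjj : n / (n / j) = j := Nat.div_div_self hdvd hn0
    unfold stepB contrib
    rw [if_pos hdvd, hjj]
    congr 1
    · simp [hdvd]
    · by_cases hne : n / j = j
      · simp [hne]
      · by_cases hok : okB m? ((j : Nat) : Int) = true <;>
          simp [hne, hok, hjdvd]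
  rw [Finset.sum_congr rfl h2, Finset.sum_add_distrib]
  have h3 : ∑ j ∈ Finset.filter (fun j => j * j ≤ n) n.divisors,
        (if n / j ≠ j then contrib c m? n (n / j) else 0)
      = ∑ j ∈ Finset.filter (fun j => j * j < n) n.divisors, contrib c m? n (n / j) := by
    rw [← Finset.sum_filter, Finset.filter_filter]
    refine Finset.sum_congr ?_ (fun _ _ => rfl)
    refine Finset.filter_congr ?_
    intro j hj
    rw [Nat.mem_divisors] at hj
    obtain ⟨hdvd, _⟩ := hj
    have hj1 : 1 ≤ j := Nat.pos_of_dvd_of_pos hdvd (by omega)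
    have heq : j * (n / j) = n := Nat.mul_div_cancel' hdvd
    have hiff : n / j = j ↔ j * j = n := by
      constructor
      · intro h; rw [h] at heq; exact heq
      · intro h
        have : n / j = (j * j) / j := by rw [h]
        rw [this, Nat.mul_div_cancel_left _ (by omega)]
    rw [ne_eq, hiff]
    constructor
    · rintro ⟨ha, hb⟩; omega
    · intro ha; exact ⟨by omega, by omega⟩
  rw [h3]
  have h4 : ∑ j ∈ Finset.filter (fun j => j * j < n) n.divisors, contrib c m? n (n / j)
      = ∑ j ∈ Finset.filter (fun j => n < j * j) n.divisors, contrib c m? n j := by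
    refine Finset.sum_nbij' (fun j => n / j) (fun j => n / j) ?_ ?_ ?_ ?_ ?_
    · intro a ha
      rw [Finset.mem_filter, Nat.mem_divisors] at ha ⊢
      obtain ⟨⟨hdvd, _⟩, hlt⟩ := ha
      have ha1 : 1 ≤ a := Nat.pos_of_dvd_of_pos hdvd (by omega)
      have heq : a * (n / a) = n := Nat.mul_div_cancel' hdvd
      have he1 : 1 ≤ n / a := Nat.div_pos (Nat.le_of_dvd (by omega) hdvd) (by omega)
      refine ⟨⟨Nat.div_dvd_of_dvd hdvd, hn0⟩, ?_⟩
      have hae : a < n / a := by nlinarith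
      nlinarith
    · intro a ha
      rw [Finset.mem_filter, Nat.mem_divisors] at ha ⊢
      obtain ⟨⟨hdvd, _⟩, hlt⟩ := ha
      have ha1 : 1 ≤ a := Nat.pos_of_dvd_of_pos hdvd (by omega)
      have heq : a * (n / a) = n := Nat.mul_div_cancel' hdvd
      have he1 : 1 ≤ n / a := Nat.div_pos (Nat.le_of_dvd (by omega) hdvd) (by omega)
      refine ⟨⟨Nat.div_dvd_of_dvd hdvd, hn0⟩, ?_⟩
      have hae : n / a < a := by nlinarith
      nlinarith
    · intro a ha
      rw [Finset.mem_filter, Nat.mem_divisors] at ha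
      exact Nat.div_div_self ha.1.1 hn0
    · intro a ha
      rw [Finset.mem_filter, Nat.mem_divisors] at ha
      exact Nat.div_div_self ha.1.1 hn0
    · intro a _; rfl
  rw [h4]
  have h5 : Finset.filter (fun j => n < j * j) n.divisors
      = Finset.filter (fun j => ¬ (j * j ≤ n)) n.divisors := by
    refine Finset.filter_congr ?_
    intro j _
    omega
  rw [h5, Finset.sum_filter_add_sum_filter_not]

lemma find_congr (o c : Int) (m? : Option Int) (houses : Array Int) : ∀ (r : List Int),
    (∀ k ∈ r, houses.getD k.toNat 0 = giftsGoB k c m? 1 0) →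
    findA houses o r = findB o c m? r := by
  intro r
  induction r with
  | nil => intro _; rfl
  | cons k rest ih =>
      intro hpt
      simp only [findA, findB, hpt k (List.mem_cons_self)]
      split_ifs with h1
      · rfl
      · exact ih (fun x hx => hpt x (List.mem_cons_of_mem _ hx))

-- ===== VERDICT (by name: the statement is the Claim_ definition above) =====
theorem solve_elf_problem_spec : Claim_equal_solve_elf_problem := by
  intro o c m? _ _
  unfold Spec_solve_elf_problem
  simp only [solve_elf_problem, solve_elf_problem_alt]
  set max := PySem.Int.floordiv o c with hmax
  set T : Nat := (max * 2).toNat with hT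
  have hlen0 : (Array.replicate T (0 : Int)).size = T := Array.size_replicate
  set housesF := (PySem.List.pyRange 1 ((Array.replicate T (0 : Int)).size : Int) 1).foldl
      (elfStep c m?) (Array.replicate T (0 : Int)) with hhF
  have hlenF : housesF.size = T := by
    rw [hhF, sieve_size, hlen0]
  have hrange : PySem.List.pyRange 1 ((housesF.size : Int)) 1
      = PySem.List.pyRange 1 (max * 2) 1 := by
    rw [hlenF]
    rcases (by omega : 0 ≤ max * 2 ∨ max * 2 < 0) with hpos | hneg
    · rw [hT, Int.toNat_of_nonneg hpos]
    · rw [PySem.List.pyRange_one_eq_nil (by omega),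
          PySem.List.pyRange_one_eq_nil (by omega)]
  rw [hrange]
  refine find_congr o c m? housesF (PySem.List.pyRange 1 (max * 2) 1) ?_
  intro k hk
  rw [PySem.List.mem_pyRange_one] at hk
  have hkT : k < (T : Int) := by
    rcases (by omega : 0 ≤ max * 2 ∨ max * 2 < 0) with hpos | hneg
    · omega
    · omega
  set n : Nat := k.toNat with hn
  have hn1 : 1 ≤ n := by omega
  have hnT : n < T := by omega
  -- A side
  have hA : housesF.getD n 0 = ∑ d ∈ n.divisors, contrib c m? n d := by
    rw [hhF, hlen0]
    rw [sieve_get c m? n hn1 T (Array.replicate T (0 : Int)) (by rw [hlen0]; exact hnT)]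
    rw [replicate_get, sum_Ico_contrib c m? n T hn1 hnT]
    ring
  -- B side
  have hB : giftsGoB (n : Int) c m? 1 0 = ∑ d ∈ n.divisors, contrib c m? n d := by
    rw [go_spec n c m? (n.sqrt + 1) 1 (by omega) (by omega) 0,
        pairing c m? n hn1]
    ring
  have hkn2 : k = (n : Int) := by omega
  rw [hA, hkn2, hB]
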